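-- pv_equiv track=rewrite | github.com/jsonanalytix/guardian-ads-dashboard | scripts/sync_google_ads.py | infer_product
-- ===== SOURCE A (Python) =====
-- def infer_product(text: str) -> str:
--     t = (text or "").lower()
--     if any(k in t for k in ("termlife", "term life", "term-life", "life insurance")):
--         return "Term Life"
--     if "dental" in t:
--         return "Dental Network"
--     if any(k in t for k in ("disability", "idi")):
--         return "Disability"
--     if any(k in t for k in ("annuity", "annuities", "rila", "retirement")):
--         return "Annuities"
--     if any(k in t for k in ("recruit", "credential", "join", "provider")):
--         return "Join Our Network"
--     return "Other"
-- ===== SOURCE B (Python) =====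
-- KEYWORD_RULE = {
--     "termlife": 0, "term life": 0, "term-life": 0, "life insurance": 0,
--     "dental": 1,
--     "disability": 2, "idi": 2,
--     "annuity": 3, "annuities": 3, "rila": 3, "retirement": 3,
--     "recruit": 4, "credential": 4, "join": 4, "provider": 4,
-- }
-- LABELS = ["Term Life", "Dental Network", "Disability", "Annuities", "Join Our Network", "Other"]
--
-- def infer_product(text: str) -> str:
--     # One left-to-right scan over the text: at each position keep the minimum
--     # rule priority of any keyword that starts there; label of the minimum wins.
--     t = (text or "").lower()
--     best = 5
--     for i in range(len(t)):
--         for k, r in KEYWORD_RULE.items():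
--             if r < best and t.startswith(k, i):
--                 best = r
--     return LABELS[best]
-- ===== Notes on version B (the rewrite author's own statement) =====
-- stated objective: alternative
-- what changed: Replaces the ordered chain of substring-containment tests with a single left-to-right scan over the text that, at each position, records the minimum priority of any keyword starting there, and finally indexes a label table by that minimum.
import Mathlib
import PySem

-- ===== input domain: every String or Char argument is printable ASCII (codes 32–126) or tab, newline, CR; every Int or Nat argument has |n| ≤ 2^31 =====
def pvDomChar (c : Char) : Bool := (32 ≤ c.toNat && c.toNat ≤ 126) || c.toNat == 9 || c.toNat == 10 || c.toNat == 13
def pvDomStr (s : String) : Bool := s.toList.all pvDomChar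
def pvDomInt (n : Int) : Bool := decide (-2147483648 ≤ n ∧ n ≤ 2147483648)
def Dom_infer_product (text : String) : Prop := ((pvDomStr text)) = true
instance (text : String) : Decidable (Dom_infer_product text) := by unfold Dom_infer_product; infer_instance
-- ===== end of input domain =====

-- B replaces A's ordered chain of containment tests by one left-to-right scan over the
-- text keeping the minimum rule priority of any keyword starting at each position.

-- ===== PORT A =====
def infer_product (text : String) : String :=
  let t := PySem.Str.lower text
  if ["termlife", "term life", "term-life", "life insurance"].any (fun k => PySem.Str.isIn k t) then "Term Life"
  else if PySem.Str.isIn "dental" t then "Dental Network"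
  else if ["disability", "idi"].any (fun k => PySem.Str.isIn k t) then "Disability"
  else if ["annuity", "annuities", "rila", "retirement"].any (fun k => PySem.Str.isIn k t) then "Annuities"
  else if ["recruit", "credential", "join", "provider"].any (fun k => PySem.Str.isIn k t) then "Join Our Network"
  else "Other"

-- ===== PORT B =====
-- KEYWORD_RULE as an association list in insertion order (dict iteration order).
def pvKeyRule : List (List Char × Nat) :=
  [ ("termlife".toList, 0), ("term life".toList, 0), ("term-life".toList, 0), ("life insurance".toList, 0),
    ("dental".toList, 1),
    ("disability".toList, 2), ("idi".toList, 2),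
    ("annuity".toList, 3), ("annuities".toList, 3), ("rila".toList, 3), ("retirement".toList, 3),
    ("recruit".toList, 4), ("credential".toList, 4), ("join".toList, 4), ("provider".toList, 4) ]

def pvLabels : List String :=
  ["Term Life", "Dental Network", "Disability", "Annuities", "Join Our Network", "Other"]

-- t[i:].startswith(k) for 0 ≤ i is exactly `PySem.Chars.startswith (t.drop i) k`.
def infer_product_alt (text : String) : String :=
  let t := (PySem.Str.lower text).toList
  let best := (List.range t.length).foldl
    (fun best i => pvKeyRule.foldl
      (fun best kr => if kr.2 < best ∧ PySem.Chars.startswith (t.drop i) kr.1 = true then kr.2 else best)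
      best) 5
  pvLabels.getD best "Other"

-- ===== PRECONDITION & SPEC =====
def Spec_infer_product (text : String) (out : String) : Prop := out = infer_product_alt text
instance (text : String) (out : String) : Decidable (Spec_infer_product text out) := by unfold Spec_infer_product; infer_instance

-- ===== CLAIM (what is proved, stated in full; the proofs are below) =====
def Claim_equal_infer_product : Prop := ∀ (text : String), Dom_infer_product text → Spec_infer_product text (infer_product text)

-- ===== LEMMAS AND PROOFS =====

-- proof-only restatement of B's accumulator
def pvBest (t : List Char) : Nat :=
  (List.range t.length).foldl
    (fun best i => pvKeyRule.foldl
      (fun best kr => if kr.2 < best ∧ PySem.Chars.startswith (t.drop i) kr.1 = true then kr.2 else best)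
      best) 5

lemma alt_eq (text : String) :
    infer_product_alt text = pvLabels.getD (pvBest (PySem.Chars.lower text.toList)) "Other" := by
  simp [infer_product_alt, pvBest, PySem.Str.toList_lower]

-- the group conditions of A, on the lowered character list
def grp (t : List Char) (r : Nat) : Bool :=
  match r with
  | 0 => ["termlife", "term life", "term-life", "life insurance"].any (fun k => PySem.Chars.isIn k.toList t)
  | 1 => PySem.Chars.isIn "dental".toList t
  | 2 => ["disability", "idi"].any (fun k => PySem.Chars.isIn k.toList t)
  | 3 => ["annuity", "annuities", "rila", "retirement"].any (fun k => PySem.Chars.isIn k.toList t)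
  | 4 => ["recruit", "credential", "join", "provider"].any (fun k => PySem.Chars.isIn k.toList t)
  | _ => false

-- generic "min over matching elements" characterisation of B's inner step
lemma foldl_min_spec {α : Type} (p : α → Nat) (q : α → Bool) :
    ∀ (l : List α) (b0 : Nat),
      (l.foldl (fun b x => if p x < b ∧ q x = true then p x else b) b0 = b0
        ∨ ∃ x ∈ l, q x = true ∧ l.foldl (fun b x => if p x < b ∧ q x = true then p x else b) b0 = p x)
      ∧ l.foldl (fun b x => if p x < b ∧ q x = true then p x else b) b0 ≤ b0
      ∧ ∀ x ∈ l, q x = true → l.foldl (fun b x => if p x < b ∧ q x = true then p x else b) b0 ≤ p x := by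
  intro l
  induction l with
  | nil => intro b0; simp
  | cons a l ih =>
    intro b0
    simp only [List.foldl_cons]
    by_cases h : p a < b0 ∧ q a = true
    · rw [if_pos h]
      obtain ⟨h1, h2, h3⟩ := ih (p a)
      refine ⟨?_, le_trans h2 (le_of_lt h.1), ?_⟩
      · rcases h1 with h1 | ⟨x, hx, hq, he⟩
        · exact Or.inr ⟨a, List.mem_cons_self, h.2, h1⟩
        · exact Or.inr ⟨x, List.mem_cons_of_mem _ hx, hq, he⟩
      · intro x hx hq
        rcases List.mem_cons.mp hx with rfl | hx
        · exact h2
        · exact h3 x hx hq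
    · rw [if_neg h]
      obtain ⟨h1, h2, h3⟩ := ih b0
      refine ⟨?_, h2, ?_⟩
      · rcases h1 with h1 | ⟨x, hx, hq, he⟩
        · exact Or.inl h1
        · exact Or.inr ⟨x, List.mem_cons_of_mem _ hx, hq, he⟩
      · intro x hx hq
        rcases List.mem_cons.mp hx with rfl | hx
        · by_cases hp : p x < b0
          · exact absurd ⟨hp, hq⟩ h
          · exact le_trans h2 (le_of_not_gt hp)
        · exact h3 x hx hq

-- flatten the nested fold into one fold over (position, keyword-rule) pairs
lemma foldl_flatten {β : Type} (g : Nat → Nat → β → Nat) :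
    ∀ (l : List Nat) (keys : List β) (b0 : Nat),
      l.foldl (fun b i => keys.foldl (g i) b) b0
        = (l.flatMap (fun i => keys.map (fun kr => (i, kr)))).foldl (fun b x => g x.1 b x.2) b0 := by
  intro l
  induction l with
  | nil => intro keys b0; simp
  | cons a l ih =>
    intro keys b0
    simp only [List.foldl_cons, List.flatMap_cons, List.foldl_append, List.foldl_map]
    exact ih keys _

-- a keyword that occurs in t occurs starting at some in-range position
lemma exists_inrange_pos (t k : List Char) (hk : k ≠ [])
    (h : PySem.Chars.isIn k t = true) : ∃ j, j < t.length ∧ k <+: t.drop j := by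
  obtain ⟨j, hj⟩ := (PySem.Chars.exists_prefix_drop_iff_isIn k t).mpr h
  by_cases hlt : j < t.length
  · exact ⟨j, hlt, hj⟩
  · rw [List.drop_eq_nil_of_le (le_of_not_gt hlt)] at hj
    exact absurd (List.prefix_nil.mp hj) hk

lemma mem_keys_isIn_grp (t : List Char) (k : List Char) (r : Nat)
    (h : (k, r) ∈ pvKeyRule) (hin : PySem.Chars.isIn k t = true) : grp t r = true := by
  fin_cases h <;> simp_all [grp]

lemma grp_exists_key (t : List Char) (r : Nat) (h : grp t r = true) :
    ∃ k, (k, r) ∈ pvKeyRule ∧ k ≠ [] ∧ PySem.Chars.isIn k t = true := by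
  match r with
  | 0 | 1 | 2 | 3 | 4 =>
    simp only [grp, List.any_cons, List.any_nil, Bool.or_false, Bool.or_eq_true] at h
    first
      | (rcases h with h | h | h | h <;> exact ⟨_, by decide, by decide, h⟩)
      | (rcases h with h | h <;> exact ⟨_, by decide, by decide, h⟩)
      | exact ⟨_, by decide, by decide, h⟩
  | (n+5) => simp [grp] at h

-- the accumulator pvBest is the least priority whose group matches (or 5)
lemma pvBest_spec (t : List Char) :
    (pvBest t = 5 ∨ grp t (pvBest t) = true)
    ∧ pvBest t ≤ 5
    ∧ ∀ r, grp t r = true → pvBest t ≤ r := by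
  have hflat := foldl_flatten
    (fun i b (kr : List Char × Nat) =>
      if kr.2 < b ∧ PySem.Chars.startswith (t.drop i) kr.1 = true then kr.2 else b)
    (List.range t.length) pvKeyRule 5
  have hb : pvBest t = ((List.range t.length).flatMap
      (fun i => pvKeyRule.map (fun kr => (i, kr)))).foldl
      (fun b x => if x.2.2 < b ∧ PySem.Chars.startswith (t.drop x.1) x.2.1 = true then x.2.2 else b) 5 := hflat
  obtain ⟨h1, h2, h3⟩ := foldl_min_spec
    (fun x : Nat × (List Char × Nat) => x.2.2)
    (fun x : Nat × (List Char × Nat) => PySem.Chars.startswith (t.drop x.1) x.2.1)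
    ((List.range t.length).flatMap (fun i => pvKeyRule.map (fun kr => (i, kr)))) 5
  rw [← hb] at h1 h2 h3
  refine ⟨?_, h2, ?_⟩
  · rcases h1 with h1 | ⟨x, hx, hq, he⟩
    · exact Or.inl h1
    · right
      simp only [List.mem_flatMap, List.mem_map, List.mem_range] at hx
      obtain ⟨i, hi, kr, hkr, rfl⟩ := hx
      have hpre : kr.1 <+: t.drop i := (PySem.Chars.startswith_iff _ _).mp hq
      have hinf : PySem.Chars.isIn kr.1 t = true :=
        (PySem.Chars.isIn_iff_infix _ _).mpr (hpre.isInfix.trans (List.drop_suffix i t).isInfix)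
      rw [he]
      exact mem_keys_isIn_grp t kr.1 kr.2 hkr hinf
  · intro r hr
    obtain ⟨k, hmem, hk, hin⟩ := grp_exists_key t r hr
    obtain ⟨j, hj, hpre⟩ := exists_inrange_pos t k hk hin
    exact h3 (j, (k, r))
      (List.mem_flatMap.mpr ⟨j, List.mem_range.mpr hj, List.mem_map.mpr ⟨(k, r), hmem, rfl⟩⟩)
      ((PySem.Chars.startswith_iff _ _).mpr hpre)

lemma a_eq_grp (text : String) :
    infer_product text =
      (let t := PySem.Chars.lower text.toList
       if grp t 0 then "Term Life"
       else if grp t 1 then "Dental Network"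
       else if grp t 2 then "Disability"
       else if grp t 3 then "Annuities"
       else if grp t 4 then "Join Our Network"
       else "Other") := by
  simp only [infer_product, grp, PySem.Str.isIn_eq, PySem.Str.toList_lower]
  rfl

lemma grp_ge5 (t : List Char) (r : Nat) (h : 5 ≤ r) : grp t r = false := by
  match r, h with
  | (n+5), _ => simp [grp]

lemma best_eq (t : List Char) (r : Nat) (hr : grp t r = true)
    (hlow : ∀ r', r' < r → grp t r' = false) : pvBest t = r := by
  obtain ⟨hmem, hle5, hmin⟩ := pvBest_spec t
  have h1 : pvBest t ≤ r := hmin r hr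
  rcases hmem with h5 | hg
  · have hr5 : r < 5 := by
      by_contra hc
      rw [grp_ge5 t r (le_of_not_gt hc)] at hr
      exact Bool.false_ne_true hr
    omega
  · by_contra hne
    have hlt : pvBest t < r := lt_of_le_of_ne h1 hne
    rw [hlow _ hlt] at hg
    exact Bool.false_ne_true hg

lemma best_eq5 (t : List Char) (hall : ∀ r, grp t r = false) : pvBest t = 5 := by
  obtain ⟨hmem, _, _⟩ := pvBest_spec t
  rcases hmem with h5 | hg
  · exact h5
  · rw [hall _] at hg
    exact absurd hg Bool.false_ne_true

-- ===== VERDICT (by name: the statement is the Claim_ definition above) =====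
theorem infer_product_spec : Claim_equal_infer_product := by
  intro text _
  show infer_product text = infer_product_alt text
  rw [a_eq_grp, alt_eq]
  set t := PySem.Chars.lower text.toList with ht
  by_cases h0 : grp t 0 = true
  · rw [best_eq t 0 h0 (by omega)]
    simp [h0, pvLabels]
  by_cases h1 : grp t 1 = true
  · rw [best_eq t 1 h1 (by intro r' hr'; interval_cases r' <;> simp_all)]
    simp only [h0, h1]
    simp [pvLabels]
  by_cases h2 : grp t 2 = true
  · rw [best_eq t 2 h2 (by intro r' hr'; interval_cases r' <;> simp_all)]
    simp only [h0, h1, h2]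
    simp [pvLabels]
  by_cases h3 : grp t 3 = true
  · rw [best_eq t 3 h3 (by intro r' hr'; interval_cases r' <;> simp_all)]
    simp only [h0, h1, h2, h3]
    simp [pvLabels]
  by_cases h4 : grp t 4 = true
  · rw [best_eq t 4 h4 (by intro r' hr'; interval_cases r' <;> simp_all)]
    simp only [h0, h1, h2, h3, h4]
    simp [pvLabels]
  · rw [best_eq5 t (by
      intro r
      by_cases hr5 : 5 ≤ r
      · exact grp_ge5 t r hr5
      · interval_cases r <;> simp_all)]
    simp only [h0, h1, h2, h3, h4]
    simp [pvLabels]
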